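-- pv_equiv track=rewrite | github.com/antontomusiak/TopCoder | srm727/make_two_consecutive.py | solve
-- ===== SOURCE A (Python) =====
-- def solve(S):
-- 	if len(S) <= 2: return "Impossible"
-- 	for i in range((len(S)-2)):
-- 		if ((S[i] == S[i + 1]) or (S[i] == S[i + 2])): return "Possible"
--
-- 	a = len(S) - 1
-- 	b = len(S) - 2
-- 	if S[a] == S[b]: return "Possible"
--
-- 	return "Impossible"
-- ===== SOURCE B (Python) =====
-- def solve(S):
--     if len(S) <= 2:
--         return "Impossible"
--     last = {}
--     for i, c in enumerate(S):
--         if c in last and i - last[c] <= 2: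
--             return "Possible"
--         last[c] = i
--     return "Impossible"
-- ===== Notes on version B (the rewrite author's own statement) =====
-- stated objective: alternative
-- what changed: Replaces A's pairwise index scan (S[i] vs S[i+1]/S[i+2] plus a special tail check) with a single pass keeping a dictionary of each character's last-seen index and firing when the current character was last seen at distance <= 2.
import Mathlib
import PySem

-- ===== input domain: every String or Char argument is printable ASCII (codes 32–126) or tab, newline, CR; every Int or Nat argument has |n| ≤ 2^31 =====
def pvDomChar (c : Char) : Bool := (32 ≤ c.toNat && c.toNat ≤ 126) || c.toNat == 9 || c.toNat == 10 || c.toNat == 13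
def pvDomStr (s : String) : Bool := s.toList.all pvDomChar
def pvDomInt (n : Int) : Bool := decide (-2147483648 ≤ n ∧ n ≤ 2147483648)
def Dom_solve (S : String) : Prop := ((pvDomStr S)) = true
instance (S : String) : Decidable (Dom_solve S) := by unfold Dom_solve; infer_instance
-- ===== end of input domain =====

-- B replaces A's pairwise index scan plus special tail check with one pass over the string
-- keeping a dictionary of each character's last-seen index; objective: alternative.

-- ===== PORT A =====
-- A: guard len<=2; one loop over range(len-2) testing S[i]==S[i+1] or S[i]==S[i+2]
-- with early return "Possible"; then the tail check S[len-1]==S[len-2]; else "Impossible".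
def solve (S : String) : String :=
  let l := S.toList
  if l.length ≤ 2 then "Impossible"
  else if (List.range (l.length - 2)).any
      (fun i => l.getD i ' ' == l.getD (i + 1) ' ' || l.getD i ' ' == l.getD (i + 2) ' ')
    then "Possible"
  else if l.getD (l.length - 1) ' ' == l.getD (l.length - 2) ' ' then "Possible"
  else "Impossible"

-- ===== PORT B =====
-- B: the enumerate-loop over the characters with the last-seen dictionary `last`;
-- early return "Possible" when `c in last and i - last[c] <= 2`, else last[c] = i.
def solveAltLoop (d : PySem.Dict Char Int) (i : Int) : List Char → String
  | [] => "Impossible"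
  | c :: rest =>
      match d.get? c with
      | some j => if i - j ≤ 2 then "Possible" else solveAltLoop (d.insert c i) (i + 1) rest
      | none => solveAltLoop (d.insert c i) (i + 1) rest

def solve_alt (S : String) : String :=
  let l := S.toList
  if l.length ≤ 2 then "Impossible"
  else solveAltLoop PySem.Dict.empty 0 l

-- ===== PRECONDITION & SPEC =====
def Spec_solve (S : String) (out : String) : Prop := out = solve_alt S
instance (S : String) (out : String) : Decidable (Spec_solve S out) := by unfold Spec_solve; infer_instance

-- ===== CLAIM (what is proved, stated in full; the proofs are below) =====
def Claim_equal_solve : Prop := ∀ (S : String), Dom_solve S → Spec_solve S (solve S)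

-- ===== LEMMAS AND PROOFS =====

-- The common characterisation: some pair of equal characters at distance 1 or 2,
-- right endpoint q (≥ k for the loop version).
def HasClose (l : List Char) (k : Nat) : Prop :=
  ∃ q, q < l.length ∧ k ≤ q ∧ ∃ p, p < q ∧ q ≤ p + 2 ∧ l.getD p ' ' = l.getD q ' '

-- Invariant of B's loop: the dictionary maps each character to the index of its
-- last occurrence strictly before position k.
def LastInv (l : List Char) (k : Nat) (d : PySem.Dict Char Int) : Prop :=
  ∀ c j, d.get? c = some j ↔
    ∃ p : Nat, j = (p : Int) ∧ p < k ∧ l.getD p ' ' = c ∧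
      ∀ q, p < q → q < k → l.getD q ' ' ≠ c

theorem LastInv_empty (l : List Char) : LastInv l 0 PySem.Dict.empty := by
  intro c j
  simp [PySem.Dict.get?_empty]

theorem LastInv_insert (l : List Char) (k : Nat) (d : PySem.Dict Char Int)
    (hk : k < l.length) (hInv : LastInv l k d) :
    LastInv l (k + 1) (d.insert (l.getD k ' ') (k : Int)) := by
  intro c j
  rw [PySem.Dict.get?_insert]
  by_cases hc : c = l.getD k ' '
  · subst hc
    constructor
    · intro h
      refine ⟨k, by simpa using h.symm, by omega, rfl, ?_⟩
      intro q hq1 hq2 _; omega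
    · rintro ⟨p, hj, hpk, hpc, hmax⟩
      have hpk' : p = k := by
        by_contra hne
        exact hmax k (by omega) (by omega) rfl
      subst hpk'; simp [hj]
  · simp only [if_neg hc]
    rw [hInv c j]
    constructor
    · rintro ⟨p, hj, hpk, hpc, hmax⟩
      refine ⟨p, hj, by omega, hpc, ?_⟩
      intro q hq1 hq2
      by_cases hqk : q = k
      · subst hqk; intro hco; exact hc hco.symm
      · exact hmax q hq1 (by omega)
    · rintro ⟨p, hj, hpk, hpc, hmax⟩
      have hpk' : p < k := by
        rcases Nat.lt_succ_iff_lt_or_eq.mp hpk with h | h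
        · exact h
        · subst h; exact absurd hpc.symm hc
      exact ⟨p, hj, hpk', hpc, fun q hq1 hq2 => hmax q hq1 (by omega)⟩

-- If no index < k holds character c, the dict lookup is none → there is in fact no
-- occurrence of c before k (take the greatest one otherwise).
theorem no_occ_of_get?_none (l : List Char) (k : Nat) (d : PySem.Dict Char Int)
    (hInv : LastInv l k d) (c : Char) (hnone : d.get? c = none) :
    ∀ p, p < k → l.getD p ' ' ≠ c := by
  intro p hp hc
  -- take the greatest index < k holding c
  classical
  set P : Nat → Prop := fun m => m < k ∧ l.getD m ' ' = c with hP
  have hPp : P p := ⟨hp, hc⟩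
  have hspec : P (Nat.findGreatest P k) :=
    Nat.findGreatest_spec (m := p) (le_of_lt hp) hPp
  set g := Nat.findGreatest P k with hg
  have hmax : ∀ q, g < q → q < k → l.getD q ' ' ≠ c := by
    intro q hq1 hq2 hqc
    exact Nat.findGreatest_is_greatest hq1 (le_of_lt hq2) ⟨hq2, hqc⟩
  have hsome : d.get? c = some (g : Int) := by
    rw [hInv c (g : Int)]
    exact ⟨g, rfl, hspec.1, hspec.2, hmax⟩
  rw [hnone] at hsome
  simp at hsome

theorem loop_cases (cs : List Char) : ∀ (d : PySem.Dict Char Int) (i : Int),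
    solveAltLoop d i cs = "Possible" ∨ solveAltLoop d i cs = "Impossible" := by
  induction cs with
  | nil => intro d i; right; rfl
  | cons c rest ih =>
      intro d i
      simp only [solveAltLoop]
      cases d.get? c with
      | none => exact ih _ _
      | some j =>
          by_cases h : i - j ≤ 2
          · left; simp [h]
          · simp only [if_neg h]; exact ih _ _

theorem loop_iff (l : List Char) : ∀ (cs : List Char) (k : Nat) (d : PySem.Dict Char Int),
    cs = l.drop k → LastInv l k d →
    (solveAltLoop d (k : Int) cs = "Possible" ↔ HasClose l k) := by
  intro cs
  induction cs with
  | nil =>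
      intro k d hdrop _
      have hk : l.length ≤ k := by
        have := congrArg List.length hdrop
        simp [List.length_drop] at this
        omega
      simp only [solveAltLoop]
      constructor
      · intro h; exact absurd h (by simp)
      · rintro ⟨q, hq, hkq, _⟩; omega
  | cons c rest ih =>
      intro k d hdrop hInv
      have hk : k < l.length := by
        have := congrArg List.length hdrop
        simp [List.length_drop] at this
        omega
      have hdropk : l.drop k = l[k] :: l.drop (k + 1) := List.drop_eq_getElem_cons hk
      rw [hdropk, List.cons.injEq] at hdrop
      have hc : c = l.getD k ' ' := by
        rw [hdrop.1, List.getD_eq_getElem l ' ' hk]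
      have hrest : rest = l.drop (k + 1) := hdrop.2
      have hcast : (k : Int) + 1 = ((k + 1 : Nat) : Int) := by push_cast; ring
      simp only [solveAltLoop]
      cases hdc : d.get? c with
      | some j =>
          rcases (hInv c j).mp hdc with ⟨p, hj, hpk, hpc, hmax⟩
          by_cases hle : (k : Int) - j ≤ 2
          · simp only [if_pos hle]
            constructor
            · intro _
              exact ⟨k, hk, le_refl k, p, hpk, by omega, by rw [hpc, hc]⟩
            · intro _; trivial
          · simp only [if_neg hle]
            rw [hcast, hc]
            rw [ih (k + 1) _ hrest (LastInv_insert l k d hk hInv)]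
            -- no qualifying pair ends at k: the last c before k is too far back
            have hnotk : ¬ ∃ p', p' < k ∧ k ≤ p' + 2 ∧ l.getD p' ' ' = l.getD k ' ' := by
              rintro ⟨p', hp'1, hp'2, hp'3⟩
              have hgt : p < p' := by omega
              exact hmax p' hgt hp'1 (by rw [hp'3, ← hc])
            constructor
            · rintro ⟨q, hq, hkq, hpq⟩
              exact ⟨q, hq, by omega, hpq⟩
            · rintro ⟨q, hq, hkq, p', hp'q, hq2, heq⟩
              rcases Nat.lt_or_ge k (q) with hlt | hge
              · exact ⟨q, hq, by omega, p', hp'q, hq2, heq⟩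
              · have hqk : q = k := by omega
                subst hqk
                exact absurd ⟨p', hp'q, hq2, heq⟩ hnotk
      | none =>
          have hno := no_occ_of_get?_none l k d hInv c hdc
          rw [hcast]
          rw [hc]
          rw [ih (k + 1) _ hrest (LastInv_insert l k d hk hInv)]
          have hnotk : ¬ ∃ p', p' < k ∧ k ≤ p' + 2 ∧ l.getD p' ' ' = l.getD k ' ' := by
            rintro ⟨p', hp'1, _, hp'3⟩
            exact hno p' hp'1 (by rw [hp'3, ← hc])
          constructor
          · rintro ⟨q, hq, hkq, hpq⟩
            exact ⟨q, hq, by omega, hpq⟩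
          · rintro ⟨q, hq, hkq, p', hp'q, hq2, heq⟩
            rcases Nat.lt_or_ge k q with hlt | hge
            · exact ⟨q, hq, by omega, p', hp'q, hq2, heq⟩
            · have hqk : q = k := by omega
              subst hqk
              exact absurd ⟨p', hp'q, hq2, heq⟩ hnotk

theorem A_iff (l : List Char) (h3 : 3 ≤ l.length) :
    ((List.range (l.length - 2)).any
        (fun i => l.getD i ' ' == l.getD (i + 1) ' ' || l.getD i ' ' == l.getD (i + 2) ' ') = true
      ∨ (l.getD (l.length - 1) ' ' == l.getD (l.length - 2) ' ') = true)
    ↔ HasClose l 0 := by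
  simp only [List.any_eq_true, List.mem_range, Bool.or_eq_true, beq_iff_eq, HasClose]
  constructor
  · rintro (⟨i, hi, heq | heq⟩ | htail)
    · exact ⟨i + 1, by omega, by omega, i, by omega, by omega, heq⟩
    · exact ⟨i + 2, by omega, by omega, i, by omega, by omega, heq⟩
    · exact ⟨l.length - 1, by omega, by omega, l.length - 2, by omega, by omega, htail.symm⟩
  · rintro ⟨q, hq, _, p, hpq, hq2, heq⟩
    rcases Nat.lt_or_ge p (l.length - 2) with hlt | hge
    · left
      refine ⟨p, hlt, ?_⟩
      rcases Nat.lt_or_ge q (p + 2) with h1 | h2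
      · have : q = p + 1 := by omega
        subst this; exact Or.inl heq
      · have : q = p + 2 := by omega
        subst this; exact Or.inr heq
    · right
      have hp : p = l.length - 2 := by omega
      have hqe : q = l.length - 1 := by omega
      subst hp; subst hqe; exact heq.symm

-- ===== VERDICT (by name: the statement is the Claim_ definition above) =====
theorem solve_spec : Claim_equal_solve := by
  intro S _
  unfold Spec_solve solve solve_alt
  set l := S.toList with hl
  by_cases hlen : l.length ≤ 2
  · simp [hlen]
  · simp only [hlen, if_false]
    have h3 : 3 ≤ l.length := by omega
    have hB : solveAltLoop PySem.Dict.empty 0 l = "Possible" ↔ HasClose l 0 := by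
      have := loop_iff l l 0 PySem.Dict.empty (by simp) (LastInv_empty l)
      simpa using this
    split_ifs with h1 h2
    · have hc : HasClose l 0 := (A_iff l h3).mp (Or.inl h1)
      exact (hB.mpr hc).symm
    · have hc : HasClose l 0 := (A_iff l h3).mp (Or.inr h2)
      exact (hB.mpr hc).symm
    · have hc : ¬ HasClose l 0 := by
        intro hc
        rcases (A_iff l h3).mpr hc with h | h
        · exact h1 h
        · exact h2 h
      rcases loop_cases l PySem.Dict.empty 0 with hP | hI
      · exact absurd (hB.mp hP) hc
      · exact hI.symm
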